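-- pv_equiv track=rewrite | github.com/tomasvanagas/prime-research | experiments/other/ono_partition_analysis.py | M2
-- ===== SOURCE A (Python) =====
-- def M2(n):
--     """MacMahon M_2(n) = sum m1*m2 over all n = m1*s1 + m2*s2, s1 < s2, m_i >= 1."""
--     total = 0
--     # Iterate over s1 from 1 upward
--     for s1 in range(1, n):
--         # Iterate over s2 > s1
--         for s2 in range(s1 + 1, n):
--             # Need m1*s1 + m2*s2 = n, m1 >= 1, m2 >= 1
--             # m2*s2 = n - m1*s1, so n - m1*s1 must be positive and divisible by s2
--             # m1 ranges from 1 to (n - s2) // s1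
--             max_m1 = (n - s2) // s1
--             if max_m1 < 1:
--                 break  # s2 too large
--             for m1 in range(1, max_m1 + 1):
--                 rem = n - m1 * s1
--                 if rem > 0 and rem % s2 == 0:
--                     m2 = rem // s2
--                     if m2 >= 1:
--                         total += m1 * m2
--         if s1 >= n - 1:
--             break
--     return total
-- ===== SOURCE B (Python) =====
-- def M2(n):
--     """MacMahon M_2(n) via sigma convolution:
--     2*M2(n) = sum_{k=1}^{n-1} sigma(k)*sigma(n-k)  -  sum_{d|n, d>=2} (d^3-d)/6."""
--     if n < 2:
--         return 0
--     sig = [0] * n  # sig[k] = sum of divisors of k for 1 <= k < n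
--     for s in range(1, n):
--         for j in range(1, (n - 1) // s + 1):
--             sig[j * s] += s
--     T = 0
--     for k in range(1, n):
--         T += sig[k] * sig[n - k]
--     E = 0
--     for d in range(2, n + 1):
--         if n % d == 0:
--             E += (d * d * d - d) // 6
--     return (T - E) // 2
-- ===== Notes on version B (the rewrite author's own statement) =====
-- stated objective: faster
-- what changed: Replaced the triple loop over pairs-of-parts with multiplicities by a closed convolution identity: twice the answer is the convolution of the divisor-sum function with itself minus a cubic correction term per divisor of n, with the divisor sums computed once by a sieve.
import Mathlib
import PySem

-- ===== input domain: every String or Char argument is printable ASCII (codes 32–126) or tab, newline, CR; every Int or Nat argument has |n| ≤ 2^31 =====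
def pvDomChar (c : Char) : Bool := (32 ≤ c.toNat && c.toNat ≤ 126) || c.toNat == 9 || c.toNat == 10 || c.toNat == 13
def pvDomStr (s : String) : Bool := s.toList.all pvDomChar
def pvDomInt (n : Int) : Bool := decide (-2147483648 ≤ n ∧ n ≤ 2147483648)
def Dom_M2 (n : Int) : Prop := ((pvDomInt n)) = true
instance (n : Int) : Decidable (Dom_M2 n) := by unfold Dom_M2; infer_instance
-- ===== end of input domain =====

-- B replaces A's triple loop by a convolution identity: twice the answer is the self-convolution of
-- the divisor-sum function minus a cubic correction per divisor of n, with the sieve computed once (measured faster).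

-- ===== PORT A =====
def M2innerM1 (n s1 s2 : Int) (ms : List Int) (total : Int) : Int :=
  ms.foldl (fun total m1 =>
    let rem := n - m1 * s1
    if 0 < rem ∧ PySem.Int.mod rem s2 = 0 then
      let m2 := PySem.Int.floordiv rem s2
      if 1 ≤ m2 then total + m1 * m2 else total
    else total) total

def M2loopS2 (n s1 : Int) (ss : List Int) (total : Int) : Int :=
  match ss with
  | [] => total
  | s2 :: rest =>
      let maxM1 := PySem.Int.floordiv (n - s2) s1
      if maxM1 < 1 then total
      else M2loopS2 n s1 rest (M2innerM1 n s1 s2 (PySem.List.pyRange 1 (maxM1 + 1) 1) total)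

def M2loopS1 (n : Int) (ss : List Int) (total : Int) : Int :=
  match ss with
  | [] => total
  | s1 :: rest =>
      let total := M2loopS2 n s1 (PySem.List.pyRange (s1 + 1) n 1) total
      if s1 ≥ n - 1 then total else M2loopS1 n rest total

def M2 (n : Int) : Int := M2loopS1 n (PySem.List.pyRange 1 n 1) 0

-- ===== PORT B =====
-- inner sieve loop: 'for j in range(1, (n-1)//s + 1): sig[j*s] += s' (indices stay in range, so the
-- total pySetD/pyGetD forms are exact here)
def M2sieveJ (n s : Int) (sig : List Int) : List Int :=
  (PySem.List.pyRange 1 (PySem.Int.floordiv (n - 1) s + 1) 1).foldl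
    (fun sig j => PySem.List.pySetD sig (j * s) (PySem.List.pyGetD sig (j * s) 0 + s)) sig

def M2_alt (n : Int) : Int :=
  if n < 2 then 0
  else
    let sig := (PySem.List.pyRange 1 n 1).foldl (fun sig s => M2sieveJ n s sig) (List.replicate n.toNat 0)
    let T := (PySem.List.pyRange 1 n 1).foldl
      (fun T k => T + PySem.List.pyGetD sig k 0 * PySem.List.pyGetD sig (n - k) 0) 0
    let E := (PySem.List.pyRange 2 (n + 1) 1).foldl
      (fun E d => if PySem.Int.mod n d = 0 then E + PySem.Int.floordiv (d * d * d - d) 6 else E) 0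
    PySem.Int.floordiv (T - E) 2

-- ===== PRECONDITION & SPEC =====
def Spec_M2 (n : Int) (out : Int) : Prop := out = M2_alt n
instance (n : Int) (out : Int) : Decidable (Spec_M2 n out) := by unfold Spec_M2; infer_instance

-- ===== CLAIM (what is proved, stated in full; the proofs are below) =====
def Claim_equal_M2 : Prop := ∀ (n : Int), Dom_M2 n → Spec_M2 n (M2 n)

-- ===== LEMMAS AND PROOFS =====

theorem sum_Ico_bot (a b : ℤ) (h : a < b) (f : ℤ → ℤ) :
    ∑ x ∈ Finset.Ico a b, f x = f a + ∑ x ∈ Finset.Ico (a+1) b, f x := by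
  rw [show Finset.Ico a b = insert a (Finset.Ico (a+1) b) from by ext x; simp; omega,
    Finset.sum_insert (by simp)]

theorem sum_map_pyRange (g : Int → Int) (b : Int) : ∀ (N : ℕ) (a : Int), b - a ≤ N →
    ((PySem.List.pyRange a b 1).map g).sum = ∑ x ∈ Finset.Ico a b, g x := by
  intro N
  induction N with
  | zero => intro a ha; rw [PySem.List.pyRange_one_eq_nil (by omega), Finset.Ico_eq_empty (by omega)]; simp
  | succ k ih =>
    intro a ha
    by_cases hab : b ≤ a
    · rw [PySem.List.pyRange_one_eq_nil hab, Finset.Ico_eq_empty (by omega)]; simp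
    · rw [PySem.List.pyRange_one_cons (by omega), sum_Ico_bot a b (by omega)]
      simp only [List.map_cons, List.sum_cons]
      rw [ih (a+1) (by omega)]

theorem sum_pyRange (g : Int → Int) (a b : Int) :
    ((PySem.List.pyRange a b 1).map g).sum = ∑ x ∈ Finset.Ico a b, g x :=
  sum_map_pyRange g b (b - a).toNat a (by omega)

-- body of the m1 loop as a pure term
def Hb (n s1 s2 m1 : Int) : Int :=
  if 0 < n - m1 * s1 ∧ PySem.Int.mod (n - m1 * s1) s2 = 0 ∧ 1 ≤ PySem.Int.floordiv (n - m1 * s1) s2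
  then m1 * PySem.Int.floordiv (n - m1 * s1) s2 else 0

theorem innerM1_eq (n s1 s2 : Int) (ms : List Int) (total : Int) :
    M2innerM1 n s1 s2 ms total = total + (ms.map (Hb n s1 s2)).sum := by
  have h1 : M2innerM1 n s1 s2 ms total = ms.foldl (fun total m1 => total + Hb n s1 s2 m1) total := by
    unfold M2innerM1
    apply PySem.List.foldl_congr_mem
    intro acc x hx
    simp only [Hb]
    split_ifs <;> omega
  rw [h1, PySem.List.foldl_add]

def Gb (n s1 s2 : Int) : Int :=
  ((PySem.List.pyRange 1 (PySem.Int.floordiv (n - s2) s1 + 1) 1).map (Hb n s1 s2)).sum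

theorem fdiv_mono_num (a b c : Int) (hc : 0 < c) (h : a ≤ b) :
    PySem.Int.floordiv a c ≤ PySem.Int.floordiv b c := by
  rw [PySem.Int.floordiv_eq_ediv_of_pos hc, PySem.Int.floordiv_eq_ediv_of_pos hc]
  exact Int.ediv_le_ediv hc h

theorem loopS2_eq (n s1 : Int) (hs1 : 1 ≤ s1) : ∀ (N : ℕ) (c : Int) (total : Int), n - c ≤ N →
    M2loopS2 n s1 (PySem.List.pyRange c n 1) total = total + ∑ s2 ∈ Finset.Ico c n, Gb n s1 s2 := by
  intro N
  induction N with
  | zero =>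
    intro c total h
    rw [PySem.List.pyRange_one_eq_nil (by omega), Finset.Ico_eq_empty (by omega)]
    simp [M2loopS2]
  | succ k ih =>
    intro c total h
    by_cases hc : n ≤ c
    · rw [PySem.List.pyRange_one_eq_nil hc, Finset.Ico_eq_empty (by omega)]; simp [M2loopS2]
    · rw [PySem.List.pyRange_one_cons (by omega)]
      simp only [M2loopS2]
      by_cases hbrk : PySem.Int.floordiv (n - c) s1 < 1
      · rw [if_pos hbrk]
        have hz : ∀ s2 ∈ Finset.Ico c n, Gb n s1 s2 = 0 := by
          intro s2 hs2
          simp only [Finset.mem_Ico] at hs2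
          have : PySem.Int.floordiv (n - s2) s1 ≤ PySem.Int.floordiv (n - c) s1 :=
            fdiv_mono_num _ _ _ (by omega) (by omega)
          unfold Gb
          rw [PySem.List.pyRange_one_eq_nil (by omega)]
          simp
        rw [Finset.sum_congr rfl hz]
        simp
      · rw [if_neg hbrk, innerM1_eq, ih (c+1) _ (by omega), sum_Ico_bot c n (by omega)]
        have : ((PySem.List.pyRange 1 (PySem.Int.floordiv (n - c) s1 + 1) 1).map (Hb n s1 c)).sum = Gb n s1 c := rfl
        rw [this]; ring

theorem loopS1_eq (n : Int) : ∀ (N : ℕ) (a : Int) (total : Int), 1 ≤ a → n - a ≤ N →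
    M2loopS1 n (PySem.List.pyRange a n 1) total
      = total + ∑ s1 ∈ Finset.Ico a n, ∑ s2 ∈ Finset.Ico (s1+1) n, Gb n s1 s2 := by
  intro N
  induction N with
  | zero =>
    intro a total ha h
    rw [PySem.List.pyRange_one_eq_nil (by omega), Finset.Ico_eq_empty (by omega)]
    simp [M2loopS1]
  | succ k ih =>
    intro a total ha h
    by_cases hc : n ≤ a
    · rw [PySem.List.pyRange_one_eq_nil hc, Finset.Ico_eq_empty (by omega)]; simp [M2loopS1]
    · rw [PySem.List.pyRange_one_cons (by omega)]
      simp only [M2loopS1]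
      rw [loopS2_eq n a ha (n - (a+1)).toNat (a+1) total (by omega)]
      by_cases hlast : a ≥ n - 1
      · rw [if_pos hlast, sum_Ico_bot a n (by omega), Finset.Ico_eq_empty (by omega : ¬ a + 1 < n)]
        simp
      · rw [if_neg hlast, ih (a+1) _ (by omega) (by omega), sum_Ico_bot a n (by omega)]
        ring

noncomputable def P2 (n s1 s2 : Int) : Int :=
  ∑ m1 ∈ Finset.Ico 1 n, ∑ m2 ∈ Finset.Ico 1 n, if m1 * s1 + m2 * s2 = n then m1 * m2 else 0

-- pointwise: A's inner-loop body equals the m2-sum, for any m1 ∈ [1,n)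
theorem Hb_eq_inner (n s1 s2 m1 : Int) (hs1 : 1 ≤ s1) (hs2 : 1 ≤ s2)
    (hm1 : 1 ≤ m1) :
    Hb n s1 s2 m1 = ∑ m2 ∈ Finset.Ico 1 n, if m1 * s1 + m2 * s2 = n then m1 * m2 else 0 := by
  have hrw : ∀ m2 : Int, (m1 * s1 + m2 * s2 = n) ↔ (m2 * s2 = n - m1 * s1) := by
    intro m2; constructor <;> intro h <;> linarith
  simp only [hrw]
  unfold Hb
  rw [PySem.Int.mod_eq_emod_of_pos (by omega), PySem.Int.floordiv_eq_ediv_of_pos (by omega)]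
  set r := n - m1 * s1 with hr
  by_cases hdvd : s2 ∣ r
  · have hmod : r % s2 = 0 := Int.emod_eq_zero_of_dvd hdvd
    have heq : ∀ m2 : Int, (m2 * s2 = r) ↔ m2 = r / s2 := by
      intro m2
      constructor
      · intro h; rw [← h]; exact (Int.mul_ediv_cancel _ (by omega)).symm
      · intro h; rw [h]; exact Int.ediv_mul_cancel hdvd
    simp only [heq]
    rw [Finset.sum_ite_eq' (Finset.Ico 1 n) (r / s2) (fun m2 => m1 * m2)]
    by_cases hrpos : 0 < r
    · have hq_le : r / s2 ≤ r := Int.ediv_le_self _ (by omega)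
      have hq_lt : r / s2 < n := by
        have : r ≤ n - 1 := by nlinarith
        omega
      by_cases hq1 : 1 ≤ r / s2
      · rw [if_pos (by omega), if_pos (Finset.mem_Ico.mpr ⟨hq1, hq_lt⟩)]
      · rw [if_neg (by omega), if_neg (by simp [Finset.mem_Ico]; omega)]
    · rw [if_neg (by omega), if_neg ?_]
      simp only [Finset.mem_Ico, not_and]
      intro h1
      have : r ≤ 0 := by omega
      have : r / s2 ≤ 0 := Int.ediv_nonpos_of_nonpos_of_neg this (by omega)
      omega
  · rw [if_neg (by
      intro hc
      exact hdvd (Int.dvd_of_emod_eq_zero hc.2.1))]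
    rw [Finset.sum_eq_zero]
    intro m2 hm2
    rw [if_neg]
    intro hc
    exact hdvd ⟨m2, by linarith⟩

theorem Gb_eq_P2 (n s1 s2 : Int) (hs1 : 1 ≤ s1) (hs12 : s1 < s2) (h2n : s2 < n) :
    Gb n s1 s2 = P2 n s1 s2 := by
  unfold Gb
  rw [sum_pyRange]
  set d := PySem.Int.floordiv (n - s2) s1 with hd
  have hdpos : 0 < s1 := by omega
  have hde : d = (n - s2) / s1 := by rw [hd, PySem.Int.floordiv_eq_ediv_of_pos hdpos]
  have hdle : d ≤ n - s2 := by rw [hde]; exact Int.ediv_le_self _ (by omega)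
  have hsub : Finset.Ico (1:ℤ) (d+1) ⊆ Finset.Ico 1 n := by
    intro x hx; simp only [Finset.mem_Ico] at *; omega
  have hvan : ∀ m1 ∈ Finset.Ico (1:ℤ) n, m1 ∉ Finset.Ico (1:ℤ) (d+1) → Hb n s1 s2 m1 = 0 := by
    intro m1 hm1 hm1'
    simp only [Finset.mem_Ico] at hm1 hm1'
    have hdm : d < m1 := by omega
    have hlt : n - s2 < m1 * s1 := by
      rw [hde] at hdm
      have := (Int.ediv_lt_iff_lt_mul hdpos).mp hdm
      linarith
    unfold Hb
    rw [PySem.Int.floordiv_eq_ediv_of_pos (by omega)]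
    rw [if_neg]
    intro hc
    obtain ⟨hc1, _, hc3⟩ := hc
    have : n - m1 * s1 < s2 := by omega
    have : (n - m1 * s1) / s2 = 0 := Int.ediv_eq_zero_of_lt (by omega) this
    omega
  rw [Finset.sum_subset hsub hvan]
  unfold P2
  exact Finset.sum_congr rfl (fun m1 hm1 =>
    Hb_eq_inner n s1 s2 m1 hs1 (by omega) (Finset.mem_Ico.mp hm1).1)

noncomputable def Qlt (n : Int) : Int :=
  ∑ s1 ∈ Finset.Ico 1 n, ∑ s2 ∈ Finset.Ico 1 n, if s1 < s2 then P2 n s1 s2 else 0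

theorem M2_eq_Qlt (n : Int) : M2 n = Qlt n := by
  unfold M2
  rw [loopS1_eq n (n-1).toNat 1 0 (by omega) (by omega), zero_add]
  unfold Qlt
  apply Finset.sum_congr rfl
  intro s1 hs1
  simp only [Finset.mem_Ico] at hs1
  have hsub : Finset.Ico (s1+1) n ⊆ Finset.Ico 1 n := by
    intro x hx; simp only [Finset.mem_Ico] at *; omega
  have hvan : ∀ s2 ∈ Finset.Ico (1:ℤ) n, s2 ∉ Finset.Ico (s1+1) n →
      (if s1 < s2 then P2 n s1 s2 else 0) = 0 := by
    intro s2 h1 h2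
    simp only [Finset.mem_Ico] at h1 h2
    rw [if_neg (by omega)]
  rw [← Finset.sum_subset hsub hvan]
  apply Finset.sum_congr rfl
  intro s2 hs2
  simp only [Finset.mem_Ico] at hs2
  rw [if_pos (by omega), Gb_eq_P2 n s1 s2 (by omega) (by omega) (by omega)]

-- ===== B-side: sieve =====

noncomputable def sigI (k : Int) : Int := ∑ s ∈ Finset.Ico 1 (k+1), if s ∣ k then s else 0

theorem sieveJ_len (n s : Int) (sig : List Int) : (M2sieveJ n s sig).length = sig.length := by
  unfold M2sieveJ
  generalize PySem.List.pyRange 1 (PySem.Int.floordiv (n - 1) s + 1) 1 = js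
  induction js generalizing sig with
  | nil => rfl
  | cons j rest ih =>
    simp only [List.foldl_cons]
    rw [ih, PySem.List.length_pySetD]

theorem step_get (s j k : Int) (sig : List Int) (hk0 : 0 ≤ k) (hk : k < sig.length)
    (hj : 0 ≤ j * s) :
    PySem.List.pyGetD (PySem.List.pySetD sig (j*s) (PySem.List.pyGetD sig (j*s) 0 + s)) k 0
      = PySem.List.pyGetD sig k 0 + (if j * s = k then s else 0) := by
  rw [PySem.List.pySetD_of_nonneg _ _ hj]
  rw [PySem.List.pyGetD_eq_getElem _ 0 hk0 (by rw [List.length_set]; exact hk)]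
  rw [List.getElem_set]
  by_cases h : j * s = k
  · rw [if_pos (by omega), if_pos h, h,
      PySem.List.pyGetD_eq_getElem _ 0 hk0 hk]
  · rw [if_neg (by omega), if_neg h, add_zero,
      PySem.List.pyGetD_eq_getElem _ 0 hk0 hk]

theorem sieveJ_fold_get (s k : Int) (hk0 : 0 ≤ k) :
    ∀ (js : List Int) (sig : List Int), k < sig.length → (∀ j ∈ js, 0 ≤ j * s) →
    PySem.List.pyGetD (js.foldl
        (fun sig j => PySem.List.pySetD sig (j * s) (PySem.List.pyGetD sig (j * s) 0 + s)) sig) k 0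
      = PySem.List.pyGetD sig k 0 + (js.map (fun j => if j * s = k then s else 0)).sum := by
  intro js
  induction js with
  | nil => intro sig _ _; simp
  | cons j rest ih =>
    intro sig hlen hall
    simp only [List.foldl_cons, List.map_cons, List.sum_cons]
    rw [ih _ ?hlen (fun x hx => hall x (List.mem_cons_of_mem _ hx))]
    · rw [step_get s j k sig hk0 (by exact_mod_cast hlen) (hall j (List.mem_cons_self ..))]
      ring
    case hlen =>
      rw [PySem.List.length_pySetD]; exact hlen

noncomputable def sigRow (n s k : Int) : Int :=
  ∑ j ∈ Finset.Ico 1 (PySem.Int.floordiv (n-1) s + 1), if j * s = k then s else 0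

theorem sieveJ_get (n s k : Int) (sig : List Int) (hs : 1 ≤ s) (hk0 : 0 ≤ k)
    (hlen : k < sig.length) :
    PySem.List.pyGetD (M2sieveJ n s sig) k 0 = PySem.List.pyGetD sig k 0 + sigRow n s k := by
  unfold M2sieveJ
  rw [sieveJ_fold_get s k hk0 _ sig hlen ?pos]
  · unfold sigRow
    rw [sum_pyRange (fun j => if j * s = k then s else 0) 1 (PySem.Int.floordiv (n-1) s + 1)]
  case pos =>
    intro j hj
    rw [PySem.List.mem_pyRange_one] at hj
    nlinarith

theorem sieve_outer_get (n k : Int) (hk0 : 0 ≤ k) : ∀ (ss : List Int) (sig : List Int),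
    k < sig.length → (∀ s ∈ ss, 1 ≤ s) →
    PySem.List.pyGetD (ss.foldl (fun sig s => M2sieveJ n s sig) sig) k 0
      = PySem.List.pyGetD sig k 0 + (ss.map (fun s => sigRow n s k)).sum := by
  intro ss
  induction ss with
  | nil => intro sig _ _; simp
  | cons s rest ih =>
    intro sig hlen hall
    simp only [List.foldl_cons, List.map_cons, List.sum_cons]
    rw [ih _ (by rw [sieveJ_len]; exact hlen) (fun x hx => hall x (List.mem_cons_of_mem _ hx)),
      sieveJ_get n s k sig (hall s (List.mem_cons_self ..)) hk0 hlen]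
    ring

-- the sieved array holds the divisor sums
theorem sieve_get (n k : Int) (hn : 2 ≤ n) (hk1 : 1 ≤ k) (hkn : k < n) :
    PySem.List.pyGetD
      ((PySem.List.pyRange 1 n 1).foldl (fun sig s => M2sieveJ n s sig) (List.replicate n.toNat 0)) k 0
      = sigI k := by
  rw [sieve_outer_get n k (by omega) _ _ (by rw [List.length_replicate]; omega)
    (fun s hs => (PySem.List.mem_pyRange_one.mp hs).1)]
  have h0 : PySem.List.pyGetD (List.replicate n.toNat (0:Int)) k 0 = 0 := by
    rw [PySem.List.pyGetD_eq_getElem _ 0 (by omega) (by rw [List.length_replicate]; omega)]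
    exact List.getElem_replicate ..
  rw [h0, zero_add, sum_pyRange (fun s => sigRow n s k) 1 n]
  -- inner: sigRow n s k = if s ∣ k then s else 0, for 1 ≤ s < n
  have hrow : ∀ s ∈ Finset.Ico (1:ℤ) n, sigRow n s k = if s ∣ k then s else 0 := by
    intro s hs
    simp only [Finset.mem_Ico] at hs
    unfold sigRow
    rw [PySem.Int.floordiv_eq_ediv_of_pos (by omega : (0:ℤ) < s)]
    by_cases hdvd : s ∣ k
    · have heq : ∀ j : Int, (j * s = k) ↔ j = k / s := by
        intro j
        constructor
        · intro h; rw [← h]; exact (Int.mul_ediv_cancel _ (by omega)).symm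
        · intro h; rw [h]; exact Int.ediv_mul_cancel hdvd
      simp only [heq]
      rw [Finset.sum_ite_eq' (Finset.Ico 1 ((n-1)/s + 1)) (k / s) (fun _ => s)]
      rw [if_pos, if_pos hdvd]
      simp only [Finset.mem_Ico]
      constructor
      · have hsk : s ≤ k := Int.le_of_dvd (by omega) hdvd
        have : 1 * s ≤ k := by omega
        have := Int.le_ediv_iff_mul_le (by omega : (0:ℤ) < s) |>.mpr this
        omega
      · have : k / s ≤ (n-1) / s := Int.ediv_le_ediv (by omega) (by omega)
        omega
    · rw [if_neg hdvd, Finset.sum_eq_zero]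
      intro j hj
      rw [if_neg]
      intro hc
      exact hdvd ⟨j, by linarith⟩
  rw [Finset.sum_congr rfl hrow]
  -- restrict to divisors ≤ k
  unfold sigI
  rw [← Finset.sum_subset (show Finset.Ico (1:ℤ) (k+1) ⊆ Finset.Ico 1 n from by
      intro x hx; simp only [Finset.mem_Ico] at *; omega)]
  intro x hx hx'
  simp only [Finset.mem_Ico] at hx hx'
  rw [if_neg]
  intro hdvd
  have := Int.le_of_dvd (by omega) hdvd
  omega

noncomputable def TT (n : Int) : Int := ∑ k ∈ Finset.Ico 1 n, sigI k * sigI (n - k)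
noncomputable def EE (n : Int) : Int :=
  ∑ d ∈ Finset.Ico 2 (n+1), if d ∣ n then PySem.Int.floordiv (d*d*d - d) 6 else 0

theorem M2_alt_eq (n : Int) (hn : 2 ≤ n) :
    M2_alt n = PySem.Int.floordiv (TT n - EE n) 2 := by
  unfold M2_alt
  rw [if_neg (by omega)]
  simp only []
  congr 1
  congr 1
  · -- T
    rw [PySem.List.foldl_add
      (g := fun k => PySem.List.pyGetD ((PySem.List.pyRange 1 n 1).foldl (fun sig s => M2sieveJ n s sig) (List.replicate n.toNat 0)) k 0
        * PySem.List.pyGetD ((PySem.List.pyRange 1 n 1).foldl (fun sig s => M2sieveJ n s sig) (List.replicate n.toNat 0)) (n - k) 0)]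
    rw [zero_add, sum_pyRange]
    unfold TT
    apply Finset.sum_congr rfl
    intro k hk
    simp only [Finset.mem_Ico] at hk
    rw [sieve_get n k hn (by omega) (by omega), sieve_get n (n-k) hn (by omega) (by omega)]
  · -- E
    have hcongr : ((PySem.List.pyRange 2 (n+1) 1).foldl
        (fun E d => if PySem.Int.mod n d = 0 then E + PySem.Int.floordiv (d*d*d - d) 6 else E) 0)
        = ((PySem.List.pyRange 2 (n+1) 1).foldl
        (fun E d => E + if d ∣ n then PySem.Int.floordiv (d*d*d - d) 6 else 0) 0) := by
      apply PySem.List.foldl_congr_mem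
      intro acc d hd
      by_cases h : d ∣ n
      · rw [if_pos (PySem.Int.mod_eq_zero_iff_dvd n d |>.mpr h), if_pos h]
      · rw [if_neg (fun hc => h (PySem.Int.mod_eq_zero_iff_dvd n d |>.mp hc)), if_neg h, add_zero]
    rw [hcongr, PySem.List.foldl_add (g := fun d => if d ∣ n then PySem.Int.floordiv (d*d*d - d) 6 else 0),
      zero_add, sum_pyRange]
    rfl

-- ===== math core =====

noncomputable def gI (n r : Int) : Int :=
  ∑ s ∈ Finset.Ico 1 n, ∑ m ∈ Finset.Ico 1 n, if m * s = r then m else 0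

noncomputable def Qall (n : Int) : Int := ∑ s1 ∈ Finset.Ico 1 n, ∑ s2 ∈ Finset.Ico 1 n, P2 n s1 s2
noncomputable def Qeq (n : Int) : Int := ∑ s ∈ Finset.Ico 1 n, P2 n s s

theorem gI_nonpos (n r : Int) (hr : r ≤ 0) : gI n r = 0 := by
  unfold gI
  apply Finset.sum_eq_zero
  intro s hs
  apply Finset.sum_eq_zero
  intro m hm
  simp only [Finset.mem_Ico] at hs hm
  rw [if_neg]
  intro hc
  nlinarith

theorem g_inner (n s r : Int) (hs : 1 ≤ s) (hr : 1 ≤ r) (hrn : r < n) :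
    (∑ m ∈ Finset.Ico (1:ℤ) n, if m * s = r then m else 0) = if s ∣ r then r / s else 0 := by
  by_cases hdvd : s ∣ r
  · have heq : ∀ m : Int, (m * s = r) ↔ m = r / s := by
      intro m
      constructor
      · intro h; rw [← h]; exact (Int.mul_ediv_cancel _ (by omega)).symm
      · intro h; rw [h]; exact Int.ediv_mul_cancel hdvd
    simp only [heq]
    rw [Finset.sum_ite_eq' (Finset.Ico 1 n) (r / s) (fun m => m), if_pos hdvd, if_pos]
    simp only [Finset.mem_Ico]
    constructor
    · have hsr : s ≤ r := Int.le_of_dvd (by omega) hdvd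
      have : 1 * s ≤ r := by omega
      have := Int.le_ediv_iff_mul_le (by omega : (0:ℤ) < s) |>.mpr this
      omega
    · have : r / s ≤ r := Int.ediv_le_self _ (by omega)
      omega
  · rw [if_neg hdvd, Finset.sum_eq_zero]
    intro m hm
    rw [if_neg]
    intro hc
    exact hdvd ⟨m, by linarith⟩

theorem gI_eq_sigI (n k : Int) (hk1 : 1 ≤ k) (hkn : k < n) : gI n k = sigI k := by
  unfold gI
  rw [Finset.sum_congr rfl (fun s hs => g_inner n s k (Finset.mem_Ico.mp hs).1 hk1 hkn)]
  rw [← Finset.sum_subset (show Finset.Ico (1:ℤ) (k+1) ⊆ Finset.Ico 1 n from by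
      intro x hx; simp only [Finset.mem_Ico] at *; omega)
    (by
      intro x hx hx'
      simp only [Finset.mem_Ico] at hx hx'
      rw [if_neg]
      intro hdvd
      have := Int.le_of_dvd (by omega) hdvd
      omega)]
  unfold sigI
  rw [← Finset.sum_filter, ← Finset.sum_filter]
  have key : ∀ a ∈ (Finset.Ico (1:ℤ) (k+1)).filter (· ∣ k),
      k / a ∈ (Finset.Ico (1:ℤ) (k+1)).filter (· ∣ k) ∧ k / (k / a) = a := by
    intro a ha
    simp only [Finset.mem_filter, Finset.mem_Ico] at ha
    obtain ⟨⟨ha1, hak⟩, c, hc⟩ := ha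
    have hc1 : 1 ≤ c := by nlinarith
    have hdiva : k / a = c := by rw [hc, Int.mul_ediv_cancel_left _ (by omega)]
    have hcdvd : c ∣ k := ⟨a, by linarith [hc]⟩
    have hck : c ≤ k := Int.le_of_dvd (by omega) hcdvd
    refine ⟨Finset.mem_filter.mpr ⟨Finset.mem_Ico.mpr ⟨by omega, by omega⟩, by rw [hdiva]; exact hcdvd⟩, ?_⟩
    rw [hdiva, hc, Int.mul_ediv_cancel _ (by omega)]
  exact Finset.sum_nbij' (fun a => k / a) (fun a => k / a)
    (fun a ha => (key a ha).1) (fun a ha => (key a ha).1)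
    (fun a ha => (key a ha).2) (fun a ha => (key a ha).2)
    (fun a ha => rfl)

theorem Qall_conv (n : Int) : Qall n = ∑ k ∈ Finset.Ico 1 n, gI n k * gI n (n - k) := by
  unfold Qall P2
  -- swap s2 and m1
  rw [Finset.sum_congr rfl (fun s1 _ => Finset.sum_comm
    (f := fun s2 m1 => ∑ m2 ∈ Finset.Ico (1:ℤ) n, if m1 * s1 + m2 * s2 = n then m1 * m2 else 0))]
  -- inner two sums are m1 * gI n (n - m1*s1)
  have inner : ∀ s1 m1 : Int, (∑ s2 ∈ Finset.Ico (1:ℤ) n, ∑ m2 ∈ Finset.Ico (1:ℤ) n,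
      if m1 * s1 + m2 * s2 = n then m1 * m2 else 0) = m1 * gI n (n - m1 * s1) := by
    intro s1 m1
    unfold gI
    rw [Finset.mul_sum]
    apply Finset.sum_congr rfl
    intro s2 _
    rw [Finset.mul_sum]
    apply Finset.sum_congr rfl
    intro m2 _
    by_cases h : m1 * s1 + m2 * s2 = n
    · rw [if_pos h, if_pos (by linarith)]
    · rw [if_neg h, if_neg (by intro hc; apply h; linarith), mul_zero]
  rw [Finset.sum_congr rfl (fun s1 _ => Finset.sum_congr rfl (fun m1 _ => inner s1 m1))]
  -- spread over k
  have spread : ∀ s1 ∈ Finset.Ico (1:ℤ) n, ∀ m1 ∈ Finset.Ico (1:ℤ) n,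
      m1 * gI n (n - m1 * s1)
        = ∑ k ∈ Finset.Ico (1:ℤ) n, if m1 * s1 = k then m1 * gI n (n - k) else 0 := by
    intro s1 hs1 m1 hm1
    simp only [Finset.mem_Ico] at hs1 hm1
    by_cases h : m1 * s1 < n
    · rw [Finset.sum_ite_eq (Finset.Ico 1 n) (m1 * s1) (fun k => m1 * gI n (n - k)),
        if_pos (Finset.mem_Ico.mpr ⟨by nlinarith, h⟩)]
    · rw [gI_nonpos n _ (by omega), Finset.sum_eq_zero, mul_zero]
      intro k hk
      simp only [Finset.mem_Ico] at hk
      rw [if_neg (by omega)]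
  rw [Finset.sum_congr rfl (fun s1 hs1 => Finset.sum_congr rfl (fun m1 hm1 => spread s1 hs1 m1 hm1))]
  -- pull k to the front
  rw [Finset.sum_congr rfl (fun s1 _ => Finset.sum_comm
    (f := fun m1 k => if m1 * s1 = k then m1 * gI n (n - k) else 0))]
  rw [Finset.sum_comm (f := fun s1 k => ∑ m1 ∈ Finset.Ico (1:ℤ) n, if m1 * s1 = k then m1 * gI n (n - k) else 0)]
  apply Finset.sum_congr rfl
  intro k _
  unfold gI
  rw [Finset.sum_mul]
  apply Finset.sum_congr rfl
  intro s1 _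
  rw [Finset.sum_mul]
  apply Finset.sum_congr rfl
  intro m1 _
  by_cases h : m1 * s1 = k
  · rw [if_pos h, if_pos h]
  · rw [if_neg h, if_neg h, zero_mul]

theorem P2_symm (n a b : Int) : P2 n a b = P2 n b a := by
  unfold P2
  rw [Finset.sum_comm (f := fun m1 m2 => if m1 * a + m2 * b = n then m1 * m2 else 0)]
  apply Finset.sum_congr rfl
  intro x _
  apply Finset.sum_congr rfl
  intro y _
  by_cases h : y * a + x * b = n
  · rw [if_pos h, if_pos (by linarith), mul_comm]
  · rw [if_neg h, if_neg (by intro hc; apply h; linarith)]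

theorem Qall_split (n : Int) : Qall n = 2 * Qlt n + Qeq n := by
  have tri : ∀ s1 s2 : Int, P2 n s1 s2 =
      (if s1 < s2 then P2 n s1 s2 else 0) + (if s1 = s2 then P2 n s1 s2 else 0)
        + (if s2 < s1 then P2 n s1 s2 else 0) := by
    intro s1 s2
    rcases lt_trichotomy s1 s2 with h | h | h
    · rw [if_pos h, if_neg (by omega), if_neg (by omega)]; ring
    · rw [if_neg (by omega), if_pos h, if_neg (by omega)]; ring
    · rw [if_neg (by omega), if_neg (by omega), if_pos h]; ring
  unfold Qall
  rw [Finset.sum_congr rfl (fun s1 _ => Finset.sum_congr rfl (fun s2 _ => tri s1 s2))]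
  simp only [Finset.sum_add_distrib]
  have hQgt : (∑ s1 ∈ Finset.Ico (1:ℤ) n, ∑ s2 ∈ Finset.Ico (1:ℤ) n,
      if s2 < s1 then P2 n s1 s2 else 0) = Qlt n := by
    rw [Finset.sum_comm (f := fun s1 s2 => if s2 < s1 then P2 n s1 s2 else 0)]
    unfold Qlt
    apply Finset.sum_congr rfl
    intro a _
    apply Finset.sum_congr rfl
    intro b _
    by_cases h : a < b
    · rw [if_pos h, if_pos h, P2_symm]
    · rw [if_neg h, if_neg h]
  have hQeq : (∑ s1 ∈ Finset.Ico (1:ℤ) n, ∑ s2 ∈ Finset.Ico (1:ℤ) n,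
      if s1 = s2 then P2 n s1 s2 else 0) = Qeq n := by
    unfold Qeq
    apply Finset.sum_congr rfl
    intro s hs
    rw [Finset.sum_ite_eq (Finset.Ico 1 n) s (fun s2 => P2 n s s2), if_pos hs]
  rw [hQgt, hQeq]
  unfold Qlt
  ring

noncomputable def cubeS (q : Int) : Int := ∑ m ∈ Finset.Ico 1 q, m * (q - m)

theorem cubeS_formula : ∀ (N : ℕ), 6 * cubeS (N : Int) = N * N * N - N := by
  intro N
  induction N with
  | zero => simp [cubeS]
  | succ k ih =>
    unfold cubeS at *
    push_cast
    by_cases hk : (k:ℤ) = 0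
    · rw [hk]
      norm_num [Finset.Ico_self]
    · rw [← Finset.sum_Ico_add_eq_sum_Ico_add_one (by omega : (1:ℤ) ≤ k) (fun m => m * ((k:ℤ) + 1 - m))]
      rw [mul_add, Finset.mul_sum]
      have hsplit : ∀ m : ℤ, 6 * (m * ((k:ℤ) + 1 - m)) = 6 * (m * ((k:ℤ) - m)) + 6 * m := by
        intro m; ring
      rw [Finset.sum_congr rfl (fun m _ => hsplit m), Finset.sum_add_distrib, ← Finset.mul_sum,
        ← Finset.mul_sum, ih]
      have gauss : ∀ (M : ℕ), (∑ m ∈ Finset.Ico (1:ℤ) (M:ℤ), m) * 2 = M * (M - 1) := by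
        intro M
        induction M with
        | zero => simp
        | succ j ihj =>
          push_cast
          by_cases hj : (j:ℤ) = 0
          · rw [hj]
            norm_num [Finset.Ico_self]
          · rw [← Finset.sum_Ico_add_eq_sum_Ico_add_one (by omega : (1:ℤ) ≤ j) (fun m => m)]
            push_cast at ihj ⊢
            nlinarith [ihj]
      have := gauss k
      nlinarith [this]

theorem P2_diag (n s : Int) (hn : 2 ≤ n) (hs : 1 ≤ s) (hsn : s < n) :
    P2 n s s = if s ∣ n then cubeS (n / s) else 0 := by
  unfold P2
  by_cases hdvd : s ∣ n
  · set q := n / s with hq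
    have hqs : q * s = n := Int.ediv_mul_cancel hdvd
    have hq1 : 2 ≤ q := by
      rcases (by omega : q ≤ 0 ∨ q = 1 ∨ 2 ≤ q) with h | h | h
      · nlinarith
      · exfalso; rw [h, one_mul] at hqs; omega
      · exact h
    have hqn : q ≤ n := by nlinarith
    have hcond : ∀ m1 m2 : Int, (m1 * s + m2 * s = n) ↔ m2 = q - m1 := by
      intro m1 m2
      constructor
      · intro h
        have : (m1 + m2) * s = q * s := by linarith
        have : m1 + m2 = q := by
          have hs0 : s ≠ 0 := by omega
          exact mul_right_cancel₀ hs0 this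
        omega
      · intro h
        rw [h]; linarith
    simp only [hcond]
    rw [if_pos hdvd]
    have hinner : ∀ m1 ∈ Finset.Ico (1:ℤ) n,
        (∑ m2 ∈ Finset.Ico (1:ℤ) n, if m2 = q - m1 then m1 * m2 else 0)
          = if m1 < q then m1 * (q - m1) else 0 := by
      intro m1 hm1
      simp only [Finset.mem_Ico] at hm1
      rw [Finset.sum_ite_eq' (Finset.Ico 1 n) (q - m1) (fun m2 => m1 * m2)]
      by_cases h : m1 < q
      · rw [if_pos (Finset.mem_Ico.mpr ⟨by omega, by omega⟩), if_pos h]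
      · rw [if_neg (by simp only [Finset.mem_Ico]; omega), if_neg h]
    rw [Finset.sum_congr rfl hinner]
    unfold cubeS
    rw [← Finset.sum_subset (show Finset.Ico (1:ℤ) q ⊆ Finset.Ico 1 n from by
        intro x hx; simp only [Finset.mem_Ico] at *; omega)
      (by
        intro x hx hx'
        simp only [Finset.mem_Ico] at hx hx'
        rw [if_neg (by omega)])]
    apply Finset.sum_congr rfl
    intro m hm
    simp only [Finset.mem_Ico] at hm
    rw [if_pos (by omega)]
  · rw [if_neg hdvd, Finset.sum_eq_zero]
    intro m1 _
    rw [Finset.sum_eq_zero]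
    intro m2 _
    rw [if_neg]
    intro hc
    exact hdvd ⟨m1 + m2, by linarith⟩

theorem Qeq_eq_EE (n : Int) (hn : 2 ≤ n) : Qeq n = EE n := by
  unfold Qeq EE
  rw [Finset.sum_congr rfl (fun s hs => P2_diag n s hn (Finset.mem_Ico.mp hs).1
      (Finset.mem_Ico.mp hs).2)]
  have hval : ∀ d ∈ Finset.Ico (2:ℤ) (n+1), (if d ∣ n then PySem.Int.floordiv (d*d*d - d) 6 else 0)
      = if d ∣ n then cubeS d else 0 := by
    intro d hd
    simp only [Finset.mem_Ico] at hd
    by_cases h : d ∣ n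
    · rw [if_pos h, if_pos h]
      have h6 : 6 * cubeS d = d * d * d - d := by
        have := cubeS_formula d.toNat
        rw [show ((d.toNat : ℕ) : ℤ) = d from by omega] at this
        exact this
      rw [show d*d*d - d = 6 * cubeS d from h6.symm, PySem.Int.floordiv_eq_ediv_of_pos (by omega),
        Int.mul_ediv_cancel_left _ (by omega)]
    · rw [if_neg h, if_neg h]
  rw [Finset.sum_congr rfl hval]
  -- bijection s ↦ n / s between divisors in [1,n) and divisors in [2,n]
  rw [← Finset.sum_filter, ← Finset.sum_filter]
  have key : ∀ a, a ∈ (Finset.Ico (1:ℤ) n).filter (· ∣ n) →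
      n / a ∈ (Finset.Ico (2:ℤ) (n+1)).filter (· ∣ n) ∧ n / (n / a) = a := by
    intro a ha
    simp only [Finset.mem_filter, Finset.mem_Ico] at ha
    obtain ⟨⟨ha1, han⟩, c, hc⟩ := ha
    have hc1 : 1 ≤ c := by nlinarith
    have hdiva : n / a = c := by rw [hc, Int.mul_ediv_cancel_left _ (by omega)]
    have hc2 : 2 ≤ c := by
      rcases (by omega : c = 1 ∨ 2 ≤ c) with h | h
      · exfalso; rw [h, mul_one] at hc; omega
      · exact h
    have hcdvd : c ∣ n := ⟨a, by linarith [hc]⟩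
    have hcn : c ≤ n := Int.le_of_dvd (by omega) hcdvd
    refine ⟨Finset.mem_filter.mpr ⟨Finset.mem_Ico.mpr ⟨by omega, by omega⟩, by rw [hdiva]; exact hcdvd⟩, ?_⟩
    rw [hdiva, hc, Int.mul_ediv_cancel _ (by omega)]
  have key2 : ∀ d, d ∈ (Finset.Ico (2:ℤ) (n+1)).filter (· ∣ n) →
      n / d ∈ (Finset.Ico (1:ℤ) n).filter (· ∣ n) ∧ n / (n / d) = d := by
    intro d hd
    simp only [Finset.mem_filter, Finset.mem_Ico] at hd
    obtain ⟨⟨hd2, hdn⟩, c, hc⟩ := hd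
    have hc1 : 1 ≤ c := by nlinarith
    have hdivd : n / d = c := by rw [hc, Int.mul_ediv_cancel_left _ (by omega)]
    have hcdvd : c ∣ n := ⟨d, by linarith [hc]⟩
    have hcn : c < n := by nlinarith
    refine ⟨Finset.mem_filter.mpr ⟨Finset.mem_Ico.mpr ⟨by omega, by omega⟩, by rw [hdivd]; exact hcdvd⟩, ?_⟩
    rw [hdivd, hc, Int.mul_ediv_cancel _ (by omega)]
  exact Finset.sum_nbij' (fun a => n / a) (fun d => n / d)
    (fun a ha => (key a ha).1) (fun d hd => (key2 d hd).1)
    (fun a ha => (key a ha).2) (fun d hd => (key2 d hd).2)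
    (fun a ha => rfl)

theorem TT_eq_Qall (n : Int) (hn : 2 ≤ n) : TT n = Qall n := by
  rw [Qall_conv]
  unfold TT
  apply Finset.sum_congr rfl
  intro k hk
  simp only [Finset.mem_Ico] at hk
  rw [gI_eq_sigI n k (by omega) (by omega), gI_eq_sigI n (n-k) (by omega) (by omega)]

theorem M2_main (n : Int) : M2 n = M2_alt n := by
  by_cases hn : n < 2
  · rw [M2_eq_Qlt]
    unfold M2_alt
    rw [if_pos hn]
    unfold Qlt
    rw [Finset.Ico_eq_empty (by omega)]
    rfl
  · rw [M2_eq_Qlt, M2_alt_eq n (by omega), TT_eq_Qall n (by omega), Qall_split n,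
      ← Qeq_eq_EE n (by omega)]
    rw [show 2 * Qlt n + Qeq n - Qeq n = 2 * Qlt n from by ring,
      PySem.Int.floordiv_eq_ediv_of_pos (by omega), Int.mul_ediv_cancel_left _ (by omega)]

-- ===== VERDICT (by name: the statement is the Claim_ definition above) =====
theorem M2_spec : Claim_equal_M2 := by
  intro n _
  unfold Spec_M2
  exact M2_main n
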